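-- pv_equiv track=rewrite | github.com/jcolinpatrick/kryptos | scripts/exploration/e_bespoke_05_98chars.py | read_grid_colwise
-- ===== SOURCE A (Python) =====
-- def read_grid_colwise(grid):
--     """Read grid column by column, top to bottom."""
--     result = []
--     nrows = len(grid)
--     ncols = max(len(r) for r in grid) if grid else 0
--     for c in range(ncols):
--         for r in range(nrows):
--             if c < len(grid[r]) and grid[r][c]:
--                 result.append(grid[r][c])
--     return ''.join(result)
-- ===== SOURCE B (Python) =====
-- def read_grid_colwise(grid):
--     """Read grid column by column, top to bottom."""
--     cells = [(c, ch) for row in grid for c, ch in enumerate(row) if ch]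
--     cells.sort(key=lambda t: t[0])
--     return ''.join(ch for _, ch in cells)
-- ===== Notes on version B (the rewrite author's own statement) =====
-- stated objective: alternative
-- what changed: B makes a single row-major pass collecting (column, cell) pairs, stable-sorts them by column index, and joins; sorting replaces A's explicit column-by-column rescan of every row (no ncols computation, no bounds guard).
import Mathlib
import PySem

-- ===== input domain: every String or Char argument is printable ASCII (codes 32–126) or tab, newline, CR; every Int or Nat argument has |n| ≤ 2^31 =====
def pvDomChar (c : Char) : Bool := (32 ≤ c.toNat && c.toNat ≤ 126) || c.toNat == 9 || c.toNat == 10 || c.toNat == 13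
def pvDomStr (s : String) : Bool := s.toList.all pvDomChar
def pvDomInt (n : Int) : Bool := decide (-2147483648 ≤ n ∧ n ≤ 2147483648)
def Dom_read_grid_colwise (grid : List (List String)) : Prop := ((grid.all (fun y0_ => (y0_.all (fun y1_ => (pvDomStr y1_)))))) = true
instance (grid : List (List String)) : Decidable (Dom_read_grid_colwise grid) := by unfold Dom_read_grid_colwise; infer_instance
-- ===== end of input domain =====

-- B collects (column, cell) pairs in one row-major pass and stable-sorts them by column index,
-- replacing A's column-by-column rescan of all rows; alternative algorithm, same return value.

-- ===== PORT A =====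
-- literal transliteration of A: nrows, ncols = max row length, nested index loops
-- appending grid[r][c] when in range and truthy (nonempty string), then ''.join.
def read_grid_colwise (grid : List (List String)) : String :=
  let nrows := grid.length
  let ncols : Nat := if grid.isEmpty then 0 else (grid.map List.length).foldl Nat.max 0
  let result : List String :=
    (List.range ncols).foldl (fun res c =>
      (List.range nrows).foldl (fun res r =>
        if c < (grid.getD r []).length ∧ (grid.getD r []).getD c "" ≠ "" then
          res ++ [(grid.getD r []).getD c ""]
        else res) res) []
  String.join result

-- ===== PORT B =====
-- cells = [(c, ch) for row in grid for c, ch in enumerate(row) if ch]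
-- cells.sort(key=lambda t: t[0])      (Python's list.sort, stable)
-- return ''.join(ch for _, ch in cells)
def read_grid_colwise_alt (grid : List (List String)) : String :=
  let cells : List (Int × String) :=
    grid.flatMap (fun row => (PySem.List.enumerate row).filter (fun p => decide (p.2 ≠ "")))
  let sortedCells := PySem.List.sorted cells (fun t => t.1)
  String.join (sortedCells.map (fun p => p.2))

-- ===== PRECONDITION & SPEC =====
def Spec_read_grid_colwise (grid : List (List String)) (out : String) : Prop := out = read_grid_colwise_alt grid
instance (grid : List (List String)) (out : String) : Decidable (Spec_read_grid_colwise grid out) := by unfold Spec_read_grid_colwise; infer_instance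

-- ===== CLAIM (what is proved, stated in full; the proofs are below) =====
def Claim_equal_read_grid_colwise : Prop := ∀ (grid : List (List String)), Dom_read_grid_colwise grid → Spec_read_grid_colwise grid (read_grid_colwise grid)

-- ===== LEMMAS AND PROOFS =====

-- the max row length (A's ncols on a nonempty grid)
def pvM (g : List (List String)) : Nat := (g.map List.length).foldl Nat.max 0

-- A's per-column bucket of the grid
def pvCol (g : List (List String)) (c : Nat) : List String :=
  (g.filter (fun row => decide (c < row.length ∧ row.getD c "" ≠ ""))).map (fun row => row.getD c "")

-- folding over range of indices with getD is folding over the list itself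
theorem pvFoldl_range_getD {α β : Type} (l : List α) (d : α) (f : β → α → β) (b : β) :
    (List.range l.length).foldl (fun a i => f a (l.getD i d)) b = l.foldl f b := by
  induction l generalizing b with
  | nil => simp
  | cons x xs ih =>
    simp only [List.length_cons, List.range_succ_eq_map, List.foldl_cons, List.foldl_map,
      List.getD_cons_zero, List.getD_cons_succ]
    exact ih (f b x)

theorem pvEnum_nil (s : Int) : PySem.List.enumerate ([] : List String) s = [] := rfl
theorem pvEnum_cons (x : String) (t : List String) (s : Int) :
    PySem.List.enumerate (x :: t) s = (s, x) :: PySem.List.enumerate t (s + 1) := rfl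

-- bounds of enumerate indices
theorem pvEnum_mem (row : List String) (s : Int) :
    ∀ p ∈ PySem.List.enumerate row s, s ≤ p.1 ∧ p.1 < s + row.length := by
  induction row generalizing s with
  | nil => intro p hp; rw [pvEnum_nil] at hp; exact absurd hp List.not_mem_nil
  | cons x t ih =>
    intro p hp
    rw [pvEnum_cons, List.mem_cons] at hp
    rcases hp with hp | hp
    · subst hp
      refine ⟨le_rfl, ?_⟩
      simp only [List.length_cons]
      push_cast
      omega
    · have := ih (s + 1) p hp
      simp only [List.length_cons]
      push_cast
      omega

-- picking out one column index from enumerate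
theorem pvEnum_filter (row : List String) (c : Nat) (s : Int) :
    (PySem.List.enumerate row s).filter (fun p => decide (p.1 = s + (c : Int))) =
      if c < row.length then [(s + (c : Int), row.getD c "")] else [] := by
  induction row generalizing c s with
  | nil => rw [pvEnum_nil]; simp
  | cons x t ih =>
    rw [pvEnum_cons, List.filter_cons]
    cases c with
    | zero =>
      have hkeep : decide (((s, x) : Int × String).1 = s + ((0 : Nat) : Int)) = true := by simp
      rw [hkeep]
      have htail : (PySem.List.enumerate t (s + 1)).filter
          (fun p => decide (p.1 = s + ((0 : Nat) : Int))) = [] := by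
        apply List.filter_eq_nil_iff.mpr
        intro p hp
        have := pvEnum_mem t (s + 1) p hp
        simp only [decide_eq_true_eq]
        omega
      rw [htail]
      simp
    | succ k =>
      have hdrop : decide (((s, x) : Int × String).1 = s + ((Nat.succ k : Nat) : Int)) = false := by
        simp; omega
      rw [hdrop]
      simp only [Bool.false_eq_true, if_false]
      have hcast : ∀ p : Int × String,
          (decide (p.1 = s + ((Nat.succ k : Nat) : Int))) = (decide (p.1 = (s + 1) + (k : Int))) := by
        intro p
        have he : s + ((Nat.succ k : Nat) : Int) = (s + 1) + (k : Int) := by push_cast; ring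
        rw [he]
      rw [List.filter_congr (fun p _ => hcast p), ih k (s + 1)]
      by_cases h : k < t.length
      · rw [if_pos h, if_pos (show Nat.succ k < (x :: t).length by
          simp only [List.length_cons]; omega)]
        have he2 : s + ((Nat.succ k : Nat) : Int) = s + 1 + (k : Int) := by push_cast; ring
        simp only [List.getD_cons_succ, he2]
      · rw [if_neg h, if_neg (show ¬ Nat.succ k < (x :: t).length by
          simp only [List.length_cons]; omega)]

-- one row's contribution to column c, after the truthiness filter
theorem pvRowCol (row : List String) (c : Nat) :
    (((PySem.List.enumerate row).filter (fun p => decide (p.2 ≠ ""))).filter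
        (fun p => decide (p.1 = (c : Int)))).map Prod.snd =
      if c < row.length ∧ row.getD c "" ≠ "" then [row.getD c ""] else [] := by
  rw [List.filter_filter]
  have hswap : ∀ p : Int × String,
      (decide (p.1 = (c : Int)) && decide (p.2 ≠ "")) =
        (decide (p.2 ≠ "") && decide (p.1 = (c : Int))) := fun p => Bool.and_comm _ _
  rw [List.filter_congr (fun p _ => hswap p), ← List.filter_filter]
  have h0 : (PySem.List.enumerate row).filter (fun p => decide (p.1 = (c : Int))) =
      if c < row.length then [((c : Int), row.getD c "")] else [] := by
    have := pvEnum_filter row c 0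
    simpa using this
  rw [h0]
  by_cases h : c < row.length
  · rw [if_pos h]
    by_cases hne : row.getD c "" = ""
    · rw [if_neg (fun hh => hh.2 hne)]
      have hd : decide ((((c : Int), row.getD c "") : Int × String).2 ≠ "") = false :=
        decide_eq_false (not_not_intro hne)
      simp only [List.filter_cons, hd, Bool.false_eq_true, if_false, List.filter_nil, List.map_nil]
    · rw [if_pos ⟨h, hne⟩]
      have hd : decide ((((c : Int), row.getD c "") : Int × String).2 ≠ "") = true :=
        decide_eq_true hne
      simp only [List.filter_cons, hd, if_true, List.filter_nil, List.map_cons, List.map_nil]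
  · rw [if_neg h, if_neg (fun hh => h hh.1)]
    simp

-- flatMap of guarded singletons is filter-then-map
theorem pvIf_flatMap (g : List (List String)) (c : Nat) :
    g.flatMap (fun row => if c < row.length ∧ row.getD c "" ≠ "" then [row.getD c ""] else []) =
      pvCol g c := by
  induction g with
  | nil => rfl
  | cons r rs ih =>
    have hcons : pvCol (r :: rs) c =
        (if c < r.length ∧ r.getD c "" ≠ "" then [r.getD c ""] else []) ++ pvCol rs c := by
      unfold pvCol
      rw [List.filter_cons]
      by_cases h : c < r.length ∧ r.getD c "" ≠ ""
      · rw [if_pos (decide_eq_true h), if_pos h, List.map_cons, List.singleton_append]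
      · rw [if_neg (by simp only [decide_eq_true_eq]; exact h), if_neg h, List.nil_append]
    rw [List.flatMap_cons, ih, hcons]

-- running max dominates the start value and every element
theorem pvle_foldl_max (l : List Nat) (b : Nat) : b ≤ l.foldl Nat.max b := by
  induction l generalizing b with
  | nil => simp
  | cons x xs ih =>
    simp only [List.foldl_cons]
    exact le_trans (Nat.le_max_left b x) (ih _)

theorem pvmem_le_foldl_max (l : List Nat) (b a : Nat) (h : a ∈ l) : a ≤ l.foldl Nat.max b := by
  induction l generalizing b with
  | nil => simp at h
  | cons x xs ih =>
    simp only [List.foldl_cons]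
    rw [List.mem_cons] at h
    rcases h with h | h
    · subst h
      exact le_trans (Nat.le_max_right b a) (pvle_foldl_max xs _)
    · exact ih _ h

-- insertBy equation lemma
theorem pvInsertBy_cons {α : Type} (p : α → α → Bool) (x y : α) (ys : List α) :
    PySem.List.insertBy p x (y :: ys) =
      if p x y = true then x :: y :: ys else y :: PySem.List.insertBy p x ys := rfl

-- insertBy slides past a prefix it does not go before
theorem pvInsertBy_append {α : Type} (p : α → α → Bool) (x : α) (A B : List α)
    (h : ∀ y ∈ A, p x y = false) :
    PySem.List.insertBy p x (A ++ B) = A ++ PySem.List.insertBy p x B := by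
  induction A with
  | nil => rfl
  | cons a as ih =>
    rw [List.cons_append, pvInsertBy_cons, h a (by simp)]
    rw [if_neg (by simp), ih (fun y hy => h y (by simp [hy]))]
    rfl

-- insertBy puts x in front of a block it goes before entirely
theorem pvInsertBy_front {α : Type} (p : α → α → Bool) (x : α) (B : List α)
    (h : ∀ y ∈ B, p x y = true) :
    PySem.List.insertBy p x B = x :: B := by
  cases B with
  | nil => rfl
  | cons b bs =>
    rw [pvInsertBy_cons, h b (by simp), if_pos rfl]

-- flatMap respects pointwise-on-members equality
theorem pvflatMap_congr {α β : Type} (R : List α) (f g : α → List β)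
    (h : ∀ c ∈ R, f c = g c) : R.flatMap f = R.flatMap g := by
  induction R with
  | nil => rfl
  | cons r rs ih =>
    simp only [List.flatMap_cons]
    rw [h r (by simp), ih (fun c hc => h c (by simp [hc]))]

-- CORE: a stable sort by key buckets the list by key value, keys in increasing order
theorem pvSortedGrouped (M : Nat) (l : List (Int × String))
    (h : ∀ p ∈ l, 0 ≤ p.1 ∧ p.1 < (M : Int)) :
    PySem.List.sorted l (fun t => t.1) =
      (List.range M).flatMap (fun c : Nat => l.filter (fun p => decide (p.1 = (c : Int)))) := by
  induction l using List.reverseRecOn with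
  | nil =>
    rw [PySem.List.sorted_eq_foldl_insertBy]
    simp
  | append_singleton l x ih =>
    have hx := h x (by simp)
    have hl : ∀ p ∈ l, 0 ≤ p.1 ∧ p.1 < (M : Int) := fun p hp => h p (by simp [hp])
    rw [PySem.List.sorted_eq_foldl_insertBy, List.foldl_append, List.foldl_cons, List.foldl_nil,
      ← PySem.List.sorted_eq_foldl_insertBy, ih hl]
    set n := x.1.toNat with hn
    have hxn : x.1 = (n : Int) := (Int.toNat_of_nonneg hx.1).symm
    have hnM : n + 1 ≤ M := by omega
    -- split range M = range' 0 n ++ [n] ++ range' (n+1) (M - (n+1))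
    have h1 : List.range' 0 n ++ List.range' n 1 = List.range' 0 (n + 1) := by
      simpa using List.range'_append (s := 0) (m := n) (n := 1) (step := 1)
    have h2 : List.range' 0 (n + 1) ++ List.range' (n + 1) (M - (n + 1)) = List.range' 0 M := by
      have := List.range'_append (s := 0) (m := n + 1) (n := M - (n + 1)) (step := 1)
      simp only [Nat.one_mul, Nat.zero_add] at this
      rw [this]; congr 1; omega
    have hsplit : List.range M = (List.range' 0 n ++ [n]) ++ List.range' (n + 1) (M - (n + 1)) := by
      rw [List.range_eq_range', ← h2, ← h1, List.range'_one]
    rw [hsplit, List.flatMap_append, List.flatMap_append, List.flatMap_append, List.flatMap_append]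
    have hAe : (List.range' 0 n).flatMap
          (fun c : Nat => (l ++ [x]).filter (fun p => decide (p.1 = (c : Int)))) =
        (List.range' 0 n).flatMap (fun c : Nat => l.filter (fun p => decide (p.1 = (c : Int)))) := by
      apply pvflatMap_congr
      intro c hc
      have hcn : c < n := by have := List.mem_range'_1.mp hc; omega
      rw [List.filter_append]
      have hone : [x].filter (fun p => decide (p.1 = (c : Int))) = [] := by
        simp [List.filter_cons, hxn]; omega
      rw [hone, List.append_nil]
    have hBe : (List.range' (n + 1) (M - (n + 1))).flatMap
          (fun c : Nat => (l ++ [x]).filter (fun p => decide (p.1 = (c : Int)))) =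
        (List.range' (n + 1) (M - (n + 1))).flatMap
          (fun c : Nat => l.filter (fun p => decide (p.1 = (c : Int)))) := by
      apply pvflatMap_congr
      intro c hc
      have hcn : n + 1 ≤ c := (List.mem_range'_1.mp hc).1
      rw [List.filter_append]
      have hone : [x].filter (fun p => decide (p.1 = (c : Int))) = [] := by
        simp [List.filter_cons, hxn]; omega
      rw [hone, List.append_nil]
    have hNe : ([n] : List Nat).flatMap
          (fun c : Nat => (l ++ [x]).filter (fun p => decide (p.1 = (c : Int)))) =
        ([n] : List Nat).flatMap (fun c : Nat => l.filter (fun p => decide (p.1 = (c : Int)))) ++ [x] := by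
      simp only [List.flatMap_cons, List.flatMap_nil, List.append_nil, List.filter_append]
      have hone : [x].filter (fun p => decide (p.1 = (n : Int))) = [x] := by
        simp [hxn]
      rw [hone]
    rw [hAe, hBe, hNe]
    have hA' : ∀ y ∈ (List.range' 0 n).flatMap
          (fun c : Nat => l.filter (fun p => decide (p.1 = (c : Int)))) ++
        ([n] : List Nat).flatMap (fun c : Nat => l.filter (fun p => decide (p.1 = (c : Int)))),
        (fun a b : Int × String => decide (a.1 < b.1)) x y = false := by
      intro y hy
      rcases List.mem_append.mp hy with hy | hy <;>
      · rcases List.mem_flatMap.mp hy with ⟨c, hc, hyf⟩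
        have hyc : y.1 = (c : Int) := by simpa using List.of_mem_filter hyf
        have hcn : c ≤ n := by
          first
          | (have := List.mem_range'_1.mp hc; omega)
          | (simp at hc; omega)
        simp only [decide_eq_false_iff_not, not_lt, hxn, hyc]
        exact_mod_cast hcn
    have hB' : ∀ y ∈ (List.range' (n + 1) (M - (n + 1))).flatMap
          (fun c : Nat => l.filter (fun p => decide (p.1 = (c : Int)))),
        (fun a b : Int × String => decide (a.1 < b.1)) x y = true := by
      intro y hy
      rcases List.mem_flatMap.mp hy with ⟨c, hc, hyf⟩
      have hyc : y.1 = (c : Int) := by simpa using List.of_mem_filter hyf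
      have hcn : n + 1 ≤ c := (List.mem_range'_1.mp hc).1
      simp only [decide_eq_true_eq, hxn, hyc]
      exact_mod_cast hcn
    rw [List.append_assoc, ← List.append_assoc _ _ ([x]), ← List.append_assoc]
    rw [pvInsertBy_append _ x _ _ (by
      intro y hy
      exact hA' y (by simpa using hy))]
    rw [pvInsertBy_front _ x _ hB']
    simp [List.append_assoc]

-- ===== VERDICT (by name: the statement is the Claim_ definition above) =====
theorem read_grid_colwise_spec : Claim_equal_read_grid_colwise := by
  intro grid _
  show read_grid_colwise grid = read_grid_colwise_alt grid
  unfold read_grid_colwise read_grid_colwise_alt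
  dsimp only
  apply congrArg String.join
  have hM : (if grid.isEmpty then (0 : Nat) else (grid.map List.length).foldl Nat.max 0) = pvM grid := by
    cases grid <;> rfl
  rw [hM]
  have hAcols : ∀ (acc : List String) (c : Nat),
      (List.range grid.length).foldl (fun res r =>
        if c < (grid.getD r []).length ∧ (grid.getD r []).getD c "" ≠ "" then
          res ++ [(grid.getD r []).getD c ""] else res) acc = acc ++ pvCol grid c := by
    intro acc c
    refine Eq.trans (pvFoldl_range_getD grid []
      (fun res row => if c < row.length ∧ row.getD c "" ≠ "" then res ++ [row.getD c ""] else res) acc) ?_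
    exact PySem.List.foldl_append_ite (p := fun row => c < row.length ∧ row.getD c "" ≠ "")
      (fun row => row.getD c "") grid acc
  rw [PySem.List.foldl_congr_mem _ _ (fun res c => res ++ pvCol grid c) _
    (fun acc c _ => hAcols acc c)]
  rw [PySem.List.foldl_append_eq_flatMap, List.nil_append]
  have hkeys : ∀ p ∈ grid.flatMap
      (fun row => (PySem.List.enumerate row).filter (fun p => decide (p.2 ≠ ""))),
      0 ≤ p.1 ∧ p.1 < ((pvM grid : Nat) : Int) := by
    intro p hp
    rcases List.mem_flatMap.mp hp with ⟨row, hrow, hpf⟩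
    have hpe := pvEnum_mem row 0 p (List.mem_of_mem_filter hpf)
    have hlen : row.length ≤ pvM grid :=
      pvmem_le_foldl_max (grid.map List.length) 0 row.length (List.mem_map_of_mem hrow)
    constructor
    · omega
    · have hb1 : p.1 < (row.length : Int) := by omega
      have hb2 : (row.length : Int) ≤ ((pvM grid : Nat) : Int) := by exact_mod_cast hlen
      omega
  rw [pvSortedGrouped (pvM grid) _ hkeys, List.map_flatMap]
  apply pvflatMap_congr
  intro c _
  rw [List.filter_flatMap, List.map_flatMap]
  rw [pvflatMap_congr grid _
    (fun row => if c < row.length ∧ row.getD c "" ≠ "" then [row.getD c ""] else [])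
    (fun row _ => pvRowCol row c)]
  exact (pvIf_flatMap grid c).symm
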